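-- pv_equiv track=rewrite | github.com/chuphu2004/ATTT | W3/W3.py | poly_str
-- ===== SOURCE A (Python) =====
-- def poly_str(n: int) -> str:
--     """Chuyển số nguyên -> chuỗi đa thức, vd 0b1011 -> 'x^3 + x + 1'."""
--     if n == 0:
--         return "0"
--     terms = []
--     i = n.bit_length() - 1
--     while i >= 0:
--         if n & (1 << i):
--             if i == 0:
--                 terms.append("1")
--             elif i == 1:
--                 terms.append("x")
--             else:
--                 terms.append(f"x^{i}")
--         i -= 1
--     return " + ".join(terms)
-- ===== SOURCE B (Python) =====
-- def poly_str(n: int) -> str: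
--     if n == 0:
--         return "0"
--     L = n.bit_length()
--
--     def go(i: int, acc: str) -> str:
--         if i >= L:
--             return acc
--         if (n >> i) & 1:
--             t = "1" if i == 0 else "x" if i == 1 else f"x^{i}"
--             acc = t if not acc else t + " + " + acc
--         return go(i + 1, acc)
--
--     return go(0, "")
-- ===== Notes on version B (the rewrite author's own statement) =====
-- stated objective: alternative
-- what changed: Replaces A's descending while-loop that appends terms to a list and joins them at the end with an ascending recursion over the bit positions that builds the result string directly, prepending each new term with its separator onto a string accumulator (no list, no join, opposite traversal order).
import Mathlib
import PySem

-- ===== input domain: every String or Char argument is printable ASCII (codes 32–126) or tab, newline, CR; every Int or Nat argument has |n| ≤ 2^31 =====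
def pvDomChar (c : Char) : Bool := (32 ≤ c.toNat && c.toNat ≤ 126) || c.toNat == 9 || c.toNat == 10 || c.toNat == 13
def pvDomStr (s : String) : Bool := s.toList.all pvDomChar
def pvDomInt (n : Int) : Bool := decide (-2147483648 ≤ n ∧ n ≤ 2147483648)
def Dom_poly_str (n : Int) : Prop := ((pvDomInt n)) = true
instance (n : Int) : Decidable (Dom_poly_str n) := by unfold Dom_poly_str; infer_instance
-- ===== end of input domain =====

-- B replaces A's descending list-append-then-join loop by an ascending recursion that
-- builds the result string directly, prepending each term (with separator) onto a string
-- accumulator — an alternative decomposition, same cost.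


-- ===== PORT A =====
-- A's while-loop: i runs from n.bit_length()-1 down to 0; fuel k = i+1.
-- 'n & (1 << i)' is PySem.Int.band n (1 <<< i) (Python-exact on negatives).
def polyStrLoop (n : Int) : Nat → List String
  | 0 => []
  | Nat.succ k =>
      (if PySem.Int.band n ((1 : Int) <<< k) ≠ 0 then
        (if k = 0 then ["1"] else if k = 1 then ["x"] else ["x^" ++ PySem.Int.toStr (k : Int)])
       else []) ++ polyStrLoop n k

def poly_str (n : Int) : String :=
  if n = 0 then "0"
  else PySem.Str.join " + " (polyStrLoop n (PySem.Int.bitLength n))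

-- ===== PORT B =====
-- Source B's helper t: the term string for exponent i
def polyTerm (i : Nat) : String :=
  if i = 0 then "1" else if i = 1 then "x" else "x^" ++ PySem.Int.toStr (i : Int)

-- Source B's recursive go(i, acc): ascending over bit positions, prepending onto the accumulator
def polyGo (n : Int) (L : Nat) (i : Nat) (acc : String) : String :=
  if i < L then
    polyGo n L (i + 1)
      (if PySem.Int.band (n >>> i) 1 ≠ 0 then
         (if acc = "" then polyTerm i else polyTerm i ++ " + " ++ acc)
       else acc)
  else acc
termination_by L - i

def poly_str_alt (n : Int) : String :=
  if n = 0 then "0" else polyGo n (PySem.Int.bitLength n) 0 ""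

-- ===== PRECONDITION & SPEC =====
def Spec_poly_str (n : Int) (out : String) : Prop := out = poly_str_alt n
instance (n : Int) (out : String) : Decidable (Spec_poly_str n out) := by unfold Spec_poly_str; infer_instance

-- ===== CLAIM =====
def Claim_equal_poly_str : Prop := ∀ (n : Int), Dom_poly_str n → Spec_poly_str n (poly_str n)

-- ===== LEMMAS AND PROOFS =====

-- the two bit tests agree: n & (1<<k) is truthy iff (n >> k) & 1 is
theorem pv_bit_test (n : Int) (k : Nat) :
    (PySem.Int.band n ((1 : Int) <<< k) ≠ 0) ↔ (PySem.Int.band (n >>> k) 1 ≠ 0) := by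
  have h1 : (1:Int) <<< k = ((2^k : Nat) : Int) := by
    simp [Int.shiftLeft_eq]
  cases n with
  | ofNat m =>
      rw [h1, show (Int.ofNat m) >>> k = Int.ofNat (m >>> k) from rfl]
      simp only [PySem.Int.band, Int.ofNat_eq_natCast, Int.natCast_nonneg, if_pos,
        Int.toNat_natCast]
      rw [show (Int.toNat 1) = 2^0 from rfl, Nat.and_two_pow, Nat.and_two_pow,
        Nat.testBit_shiftRight]
      cases hb : m.testBit (k + 0) <;> simp_all
  | negSucc m =>
      rw [h1, show (Int.negSucc m) >>> k = Int.negSucc (m >>> k) from rfl]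
      have hn : ¬ (0 ≤ Int.negSucc m) := by simp [Int.negSucc_not_nonneg]
      have hn2 : ¬ (0 ≤ Int.negSucc (m >>> k)) := by simp [Int.negSucc_not_nonneg]
      simp only [PySem.Int.band, hn, hn2, if_false, Int.natCast_nonneg, if_pos,
        Int.toNat_natCast]
      have e1 : (-Int.negSucc m - 1).toNat = m := by
        rw [Int.negSucc_eq]; omega
      have e2 : (-Int.negSucc (m >>> k) - 1).toNat = m >>> k := by
        rw [Int.negSucc_eq]; omega
      rw [e1, e2, show (Int.toNat 1) = 2^0 from rfl]
      rw [Nat.and_comm (2^k) m, Nat.and_comm (2^0), Nat.and_two_pow, Nat.and_two_pow,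
        Nat.testBit_shiftRight]
      cases hb : m.testBit (k + 0) <;> simp_all

-- the descending term list for bit positions in [i, L), via B's bit test
def polySeg (n : Int) (i L : Nat) : List String :=
  if i < L then
    polySeg n (i + 1) L ++
      (if PySem.Int.band (n >>> i) 1 ≠ 0 then [polyTerm i] else [])
  else []
termination_by L - i

-- peeling the TOP bit off a segment
theorem pv_seg_snoc (n : Int) (L : Nat) :
    ∀ i, i ≤ L →
      polySeg n i (L + 1)
        = (if PySem.Int.band (n >>> L) 1 ≠ 0 then [polyTerm L] else []) ++ polySeg n i L := by
  intro i hi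
  induction hL : L - i generalizing i with
  | zero =>
      have hEq : i = L := by omega
      rw [hEq]
      have h1 : polySeg n (L + 1) (L + 1) = [] := by rw [polySeg]; simp
      have h2 : polySeg n L L = [] := by rw [polySeg]; simp
      rw [polySeg, if_pos (show L < L + 1 by omega), h1, h2]
      simp
  | succ k ih =>
      have hlt : i < L := by omega
      have hstep : polySeg n i L =
          polySeg n (i + 1) L ++
            (if PySem.Int.band (n >>> i) 1 ≠ 0 then [polyTerm i] else []) := by
        rw [polySeg, if_pos hlt]
      rw [polySeg, if_pos (show i < L + 1 by omega), ih (i + 1) (by omega) (by omega), hstep]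
      simp [List.append_assoc]

-- A's loop equals the full segment [0, L)
theorem pv_loop_eq_seg (n : Int) (L : Nat) :
    polyStrLoop n L = polySeg n 0 L := by
  induction L with
  | zero => rw [polyStrLoop, polySeg, if_neg (by omega)]
  | succ k ih =>
      rw [polyStrLoop, ih, pv_seg_snoc n k 0 (by omega)]
      by_cases h : PySem.Int.band (n >>> k) 1 ≠ 0
      · rw [if_pos ((pv_bit_test n k).mpr h), if_pos h]
        congr 1
        unfold polyTerm
        by_cases hk0 : k = 0
        · simp [hk0]
        · by_cases hk1 : k = 1
          · simp [hk1]
          · simp [hk0, hk1]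
      · rw [if_neg (fun hc => h ((pv_bit_test n k).mp hc)), if_neg h]

-- turn a string into the 0- or 1-element list it contributes to a join
def polyAccList (acc : String) : List String := if acc = "" then [] else [acc]

-- gluing the last two pieces with the separator does not change a join (Chars level)
theorem pv_chars_join_glue (sep a b : List Char) :
    ∀ X : List (List Char),
      PySem.Chars.join sep (X ++ [a, b]) = PySem.Chars.join sep (X ++ [a ++ sep ++ b]) := by
  intro X
  induction X with
  | nil =>
      simp only [List.nil_append]
      rw [PySem.Chars.join_cons_cons, PySem.Chars.join_singleton, PySem.Chars.join_singleton]
  | cons x X' ih =>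
      have h1 : ∃ y ys, X' ++ [a, b] = y :: ys := by
        cases h : X' ++ [a, b] with
        | nil => exact absurd h (by simp)
        | cons y ys => exact ⟨y, ys, rfl⟩
      have h2 : ∃ z zs, X' ++ [a ++ sep ++ b] = z :: zs := by
        cases h : X' ++ [a ++ sep ++ b] with
        | nil => exact absurd h (by simp)
        | cons z zs => exact ⟨z, zs, rfl⟩
      obtain ⟨y, ys, hy⟩ := h1
      obtain ⟨z, zs, hz⟩ := h2
      rw [List.cons_append, hy, PySem.Chars.join_cons_cons, ← hy, ih, hz]
      rw [List.cons_append, hz, PySem.Chars.join_cons_cons]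

-- the same glue at String level
theorem pv_join_glue (a b : String) (X : List String) :
    PySem.Str.join " + " (X ++ [a, b]) = PySem.Str.join " + " (X ++ [a ++ " + " ++ b]) := by
  unfold PySem.Str.join
  congr 1
  simp only [List.map_append, List.map_cons, List.map_nil, String.toList_append]
  exact pv_chars_join_glue _ _ _ _

-- a term string is never empty
theorem pv_term_ne (i : Nat) : polyTerm i ≠ "" := by
  unfold polyTerm
  split_ifs
  · decide
  · decide
  · intro h
    have := congrArg String.toList h
    simp [String.toList_append] at this

-- prepending a term keeps the accumulator nonempty
theorem pv_pre_ne (i : Nat) (acc : String) : polyTerm i ++ " + " ++ acc ≠ "" := by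
  intro h
  have := congrArg String.toList h
  simp [String.toList_append] at this

-- B's recursion computes the join of the remaining segment with the accumulator appended
theorem pv_go_eq (n : Int) (L : Nat) :
    ∀ i acc, i ≤ L →
      polyGo n L i acc = PySem.Str.join " + " (polySeg n i L ++ polyAccList acc) := by
  intro i acc hi
  induction hL : L - i generalizing i acc with
  | zero =>
      have : i = L := by omega
      subst this
      rw [polyGo, if_neg (by omega), polySeg, if_neg (by omega)]
      unfold polyAccList
      by_cases h : acc = ""
      · simp only [h, List.nil_append]
        rfl
      · rw [if_neg h]
        simp only [List.nil_append]
        unfold PySem.Str.join PySem.Chars.join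
        simp [List.intercalate]
  | succ k ih =>
      have hlt : i < L := by omega
      rw [polyGo, if_pos hlt, polySeg, if_pos hlt]
      by_cases hb : PySem.Int.band (n >>> i) 1 ≠ 0
      · rw [if_pos hb, if_pos hb, ih _ _ (by omega) (by omega)]
        by_cases h : acc = ""
        · simp [h, polyAccList, pv_term_ne i]
        · rw [if_neg h]
          unfold polyAccList
          rw [if_neg h, if_neg (pv_pre_ne i acc), List.append_assoc]
          exact (pv_join_glue (polyTerm i) acc (polySeg n (i + 1) L)).symm
      · rw [if_neg hb, if_neg hb, ih _ _ (by omega) (by omega)]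
        simp

-- ===== VERDICT =====
theorem poly_str_spec : Claim_equal_poly_str := by
  intro n _
  unfold Spec_poly_str poly_str poly_str_alt
  by_cases h : n = 0
  · simp [h]
  · rw [if_neg h, if_neg h, pv_go_eq n _ 0 "" (by omega), pv_loop_eq_seg]
    simp [polyAccList]
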